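-- pv_equiv track=rewrite | github.com/Xuanma0/Project-Be-your-eyes | Gateway/services/planner_service/pov_adapter.py | _decision_requires_stop
-- ===== SOURCE A (Python) =====
-- from typing import Any
--
-- def _decision_requires_stop(row: dict[str, Any]) -> bool:
--     blob = " ".join(
--         [
--             str(row.get("state", "")),
--             str(row.get("action", "")),
--             str(row.get("outcome", "")),
--             str(row.get("severity", "")),
--             str(row.get("label", "")),
--             str(row.get("intent", "")),
--         ]
--     ).lower()
--     return any(token in blob for token in ("stop", "critical", "danger", "hazard"))
-- ===== SOURCE B (Python) =====
-- def _decision_requires_stop(row: dict) -> bool: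
--     # Per-field scan: no joined blob is built; return on first hit.
--     for name in ("state", "action", "outcome", "severity", "label", "intent"):
--         val = str(row.get(name, "")).lower()
--         for token in ("stop", "critical", "danger", "hazard"):
--             if token in val:
--                 return True
--     return False
-- ===== Notes on version B (the rewrite author's own statement) =====
-- stated objective: simpler
-- what changed: B drops the build-then-scan shape: instead of concatenating the six fields into one lowered blob and scanning it per token, B scans each field's lowered value separately and returns on the first token hit (sound because the tokens contain no space, so no match can cross the join boundaries).
import Mathlib
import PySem

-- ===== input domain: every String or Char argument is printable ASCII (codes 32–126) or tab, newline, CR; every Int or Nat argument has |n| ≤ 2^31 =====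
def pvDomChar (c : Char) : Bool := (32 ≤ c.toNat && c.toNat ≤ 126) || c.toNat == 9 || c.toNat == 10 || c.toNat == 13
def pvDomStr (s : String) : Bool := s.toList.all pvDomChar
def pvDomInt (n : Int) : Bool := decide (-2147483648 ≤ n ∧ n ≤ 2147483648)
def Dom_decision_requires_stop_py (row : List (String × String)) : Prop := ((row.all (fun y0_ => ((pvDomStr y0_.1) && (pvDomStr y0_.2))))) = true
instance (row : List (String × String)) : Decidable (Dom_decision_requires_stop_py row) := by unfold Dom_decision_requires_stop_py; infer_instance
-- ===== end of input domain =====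

-- B replaces A's build-one-blob-then-scan with a per-field scan over the six keys,
-- returning on the first token hit (simpler; equal because the tokens contain no space).


-- ===== PORT A =====
-- str(...) on the (already String) values is the identity and is dropped.
def decision_requires_stop_py (row : List (String × String)) : Bool :=
  let d : PySem.Dict String String := ⟨row⟩
  let blob := PySem.Str.lower (PySem.Str.join " "
    [PySem.Dict.getD d "state" "", PySem.Dict.getD d "action" "",
     PySem.Dict.getD d "outcome" "", PySem.Dict.getD d "severity" "",
     PySem.Dict.getD d "label" "", PySem.Dict.getD d "intent" ""])
  (["stop", "critical", "danger", "hazard"] : List String).any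
    (fun token => PySem.Str.isIn token blob)

-- ===== PORT B =====
def decision_requires_stop_py_alt (row : List (String × String)) : Bool :=
  let d : PySem.Dict String String := ⟨row⟩
  (["state", "action", "outcome", "severity", "label", "intent"] : List String).any
    (fun name =>
      let val := PySem.Str.lower (PySem.Dict.getD d name "")
      (["stop", "critical", "danger", "hazard"] : List String).any
        (fun token => PySem.Str.isIn token val))

-- ===== PRECONDITION & SPEC =====
def Spec_decision_requires_stop_py (row : List (String × String)) (out : Bool) : Prop := out = decision_requires_stop_py_alt row
instance (row : List (String × String)) (out : Bool) : Decidable (Spec_decision_requires_stop_py row out) := by unfold Spec_decision_requires_stop_py; infer_instance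

-- ===== CLAIM (what is proved, stated in full; the proofs are below) =====
def Claim_equal_decision_requires_stop_py : Prop := ∀ (row : List (String × String)), Dom_decision_requires_stop_py row → Spec_decision_requires_stop_py row (decision_requires_stop_py row)

-- ===== LEMMAS AND PROOFS =====

-- A prefix of xs ++ c :: ys not containing c is a prefix of xs.
theorem pv_prefix_append_cons {α : Type} (sub xs ys : List α) (c : α) (hc : c ∉ sub) :
    sub <+: xs ++ c :: ys ↔ sub <+: xs := by
  constructor
  · intro h
    by_cases hl : sub.length ≤ xs.length
    · exact List.prefix_of_prefix_length_le h (List.prefix_append xs (c :: ys)) hl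
    · exfalso
      obtain ⟨t, ht⟩ := h
      apply hc
      have hx : xs.length < sub.length := by omega
      have hlen : xs.length < (sub ++ t).length := by simp; omega
      have e1 : (sub ++ t)[xs.length]'hlen = sub[xs.length]'hx := List.getElem_append_left hx
      have e2 : (sub ++ t)[xs.length]'hlen = (xs ++ c :: ys)[xs.length]'(by simp) :=
        List.getElem_of_eq ht hlen
      have e3 : (xs ++ c :: ys)[xs.length]'(by simp) = c := by
        simp [List.getElem_append_right (le_refl xs.length)]
      have hcmem : sub[xs.length]'hx = c := e1.symm.trans (e2.trans e3)
      exact hcmem ▸ List.getElem_mem hx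
  · intro h
    exact h.trans (List.prefix_append xs (c :: ys))

-- An infix of xs ++ c :: ys not containing c is an infix of xs or of ys.
theorem pv_infix_append_cons {α : Type} (sub xs ys : List α) (c : α) (hc : c ∉ sub) :
    sub <:+: xs ++ c :: ys ↔ sub <:+: xs ∨ sub <:+: ys := by
  induction xs with
  | nil =>
    simp only [List.nil_append, List.infix_cons_iff]
    constructor
    · rintro (h | h)
      · rcases sub with _ | ⟨a, sub'⟩
        · exact Or.inl List.nil_infix
        · exfalso
          obtain ⟨t, ht⟩ := h
          simp only [List.cons_append] at ht
          apply hc; rw [List.cons.injEq] at ht; rw [ht.1]; exact List.mem_cons_self ..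
      · exact Or.inr h
    · rintro (h | h)
      · rw [List.infix_nil] at h; subst h; exact Or.inr List.nil_infix
      · exact Or.inr h
  | cons x xs' ih =>
    rw [List.cons_append, List.infix_cons_iff, ih, List.infix_cons_iff]
    rw [show x :: (xs' ++ c :: ys) = (x :: xs') ++ c :: ys from rfl,
        pv_prefix_append_cons sub (x :: xs') ys c hc]
    tauto

-- Boolean form on Chars.isIn.
theorem pv_isIn_append_cons (sub xs ys : List Char) (c : Char) (hc : c ∉ sub) :
    PySem.Chars.isIn sub (xs ++ c :: ys)
      = (PySem.Chars.isIn sub xs || PySem.Chars.isIn sub ys) := by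
  rw [Bool.eq_iff_iff]
  simp [PySem.Chars.isIn_iff_infix, pv_infix_append_cons sub xs ys c hc]

-- A space-free token is in the lowered space-join of six strings iff it is in one lowered part.
theorem pv_isIn_blob (t : List Char) (hc : ' ' ∉ t) (v1 v2 v3 v4 v5 v6 : List Char) :
    PySem.Chars.isIn t (PySem.Chars.lower (PySem.Chars.join [' '] [v1, v2, v3, v4, v5, v6]))
      = (PySem.Chars.isIn t (PySem.Chars.lower v1) || PySem.Chars.isIn t (PySem.Chars.lower v2) ||
         PySem.Chars.isIn t (PySem.Chars.lower v3) || PySem.Chars.isIn t (PySem.Chars.lower v4) ||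
         PySem.Chars.isIn t (PySem.Chars.lower v5) || PySem.Chars.isIn t (PySem.Chars.lower v6)) := by
  have hsp : PySem.Chars.lowerChar ' ' = ' ' := rfl
  simp only [PySem.Chars.join_cons_cons, PySem.Chars.join_singleton, PySem.Chars.lower,
    List.map_append, List.append_assoc, List.singleton_append, List.map_cons, hsp]
  rw [pv_isIn_append_cons _ _ _ _ hc, pv_isIn_append_cons _ _ _ _ hc,
      pv_isIn_append_cons _ _ _ _ hc, pv_isIn_append_cons _ _ _ _ hc,
      pv_isIn_append_cons _ _ _ _ hc]
  simp [Bool.or_assoc]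

-- ===== VERDICT (by name: the statement is the Claim_ definition above) =====
theorem decision_requires_stop_py_spec : Claim_equal_decision_requires_stop_py := by
  intro row _
  unfold Spec_decision_requires_stop_py decision_requires_stop_py decision_requires_stop_py_alt
  simp only [List.any_cons, List.any_nil, PySem.Str.isIn_eq, PySem.Str.toList_lower,
    PySem.Str.toList_join, List.map_cons, List.map_nil]
  have hsep : (" " : String).toList = [' '] := rfl
  rw [hsep]
  rw [pv_isIn_blob _ (by decide), pv_isIn_blob _ (by decide),
      pv_isIn_blob _ (by decide), pv_isIn_blob _ (by decide)]
  simp only [Bool.or_false, Bool.or_assoc]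
  ac_rfl
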